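-- pv_equiv track=rewrite | github.com/manas-17045/LeetcodeSolutions | Leetcode 1601-1700/1621/1621-2.py | numberOfSets
-- ===== SOURCE A (Python) =====
-- def numberOfSets(n: int, k: int) -> int:
--     """
--     Calculates the number of ways to choose k non-overlapping line segments
--     from n points on a 1D line.
--
--     Args:
--         n (int): The number of points on the line (from 0 to n-1).
--         k (int): The number of non-overlapping line segments to choose.
--     Returns:
--         int: The number of ways to choose k non-overlapping line segments.
--     """
--     MOD = 10**9 + 7
--
--     if k == 0:
--         return 1
--     if n < (k + 1):
--         return 0
--
--     prev = [1] * (n + 1)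
--
--     for seg in range(1, k + 1):
--         pref = [0] * (n + 1)
--         for i in range(1, (n + 1)):
--             pref[i] = (pref[i - 1] + prev[i]) % MOD
--
--         cur = [0] * (n + 1)
--         for i in range(1, n + 1):
--             cur[i] = (cur[i - 1] + pref[i - 1]) % MOD
--
--         prev = cur
--
--     return prev[n]
-- ===== SOURCE B (Python) =====
-- def numberOfSets(n: int, k: int) -> int:
--     # Closed form: the answer is C(n+k-1, 2k); compute it by the exact
--     # multiplicative formula instead of the prefix-sum DP.
--     MOD = 10**9 + 7
--     if k == 0:
--         return 1
--     if n < k + 1: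
--         return 0
--     c = 1
--     for i in range(1, 2 * k + 1):
--         c = c * (n - k - 1 + i) // i   # exact integer division at every step
--     return c % MOD
-- ===== Notes on version B (the rewrite author's own statement) =====
-- stated objective: simpler
-- what changed: Replaced the k-round prefix-sum dynamic program over arrays of length n+1 by the closed-form binomial C(n+k-1, 2k) mod 1e9+7, computed by the exact multiplicative formula in a single loop of 2k steps.
import Mathlib
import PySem

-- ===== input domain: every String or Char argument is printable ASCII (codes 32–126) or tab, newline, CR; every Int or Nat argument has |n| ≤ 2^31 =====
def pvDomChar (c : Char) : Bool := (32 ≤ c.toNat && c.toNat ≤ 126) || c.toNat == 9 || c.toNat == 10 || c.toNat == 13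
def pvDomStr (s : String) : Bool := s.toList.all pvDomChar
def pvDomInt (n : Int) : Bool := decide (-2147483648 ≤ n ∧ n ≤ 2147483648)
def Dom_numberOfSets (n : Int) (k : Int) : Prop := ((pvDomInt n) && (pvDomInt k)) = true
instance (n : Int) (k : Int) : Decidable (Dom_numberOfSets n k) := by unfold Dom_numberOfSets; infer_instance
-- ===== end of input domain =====

-- B replaces A's k-round prefix-sum dynamic program by the closed-form binomial
-- C(n+k-1, 2k) mod 1e9+7, computed by the exact multiplicative formula (objective: simpler).

-- ===== PORT A =====
-- Literal port of A.  'pref[i] = ...' / 'cur[i] = ...' are in-place assignments on the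
-- preallocated [0]*(n+1) arrays, ported with PySem.List.pySetD; '%' is Python's mod.
def numberOfSets (n : Int) (k : Int) : Int :=
  let MOD : Int := 10 ^ 9 + 7
  if k = 0 then 1
  else if n < k + 1 then 0
  else
    let prev0 : List Int := List.replicate (n + 1).toNat 1
    let prev := (PySem.List.pyRange 1 (k + 1) 1).foldl (fun prev _seg =>
      let pref := (PySem.List.pyRange 1 (n + 1) 1).foldl (fun pref i =>
          PySem.List.pySetD pref i
            (PySem.Int.mod (PySem.List.pyGetD pref (i - 1) 0 + PySem.List.pyGetD prev i 0) MOD))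
        (List.replicate (n + 1).toNat 0)
      let cur := (PySem.List.pyRange 1 (n + 1) 1).foldl (fun cur i =>
          PySem.List.pySetD cur i
            (PySem.Int.mod (PySem.List.pyGetD cur (i - 1) 0 + PySem.List.pyGetD pref (i - 1) 0) MOD))
        (List.replicate (n + 1).toNat 0)
      cur) prev0
    PySem.List.pyGetD prev n 0

-- ===== PORT B =====
def numberOfSets_alt (n : Int) (k : Int) : Int :=
  let MOD : Int := 10 ^ 9 + 7
  if k = 0 then 1
  else if n < k + 1 then 0
  else
    let c := (PySem.List.pyRange 1 (2 * k + 1) 1).foldl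
      (fun c i => PySem.Int.floordiv (c * (n - k - 1 + i)) i) 1
    PySem.Int.mod c MOD

-- ===== PRECONDITION & SPEC =====
-- Pre_ excludes exactly the inputs where A raises IndexError (prev[n] with n < 0 on a
-- list of length max(n+1,0) ≤ 0, reachable only for k ≤ n-1 < 0): A returns everywhere else.
def Pre_numberOfSets (n : Int) (k : Int) : Prop := 0 ≤ n ∨ k = 0 ∨ n < k + 1
instance (n : Int) (k : Int) : Decidable (Pre_numberOfSets n k) := by unfold Pre_numberOfSets; infer_instance
def pvWitness_numberOfSets : Int × Int := (7, 2)

def Spec_numberOfSets (n : Int) (k : Int) (out : Int) : Prop := out = numberOfSets_alt n k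
instance (n : Int) (k : Int) (out : Int) : Decidable (Spec_numberOfSets n k out) := by unfold Spec_numberOfSets; infer_instance

-- ===== CLAIM (what is proved, stated in full; the proofs are below) =====
def Claim_equal_numberOfSets : Prop := ∀ (n : Int) (k : Int), Dom_numberOfSets n k → Pre_numberOfSets n k → Spec_numberOfSets n k (numberOfSets n k)

-- ===== LEMMAS AND PROOFS =====

def pvM : Int := 10 ^ 9 + 7

def pvScan (h : Int → Int) : Nat → Int
  | 0 => 0
  | i + 1 => PySem.Int.mod (pvScan h i + h ((i : Int) + 1)) pvM

def pvFill (m : Nat) (h : Int → Int) : List Int :=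
  (PySem.List.pyRange 1 ((m : Int) + 1) 1).foldl (fun l i =>
      PySem.List.pySetD l i
        (PySem.Int.mod (PySem.List.pyGetD l (i - 1) 0 + h i) pvM))
    (List.replicate (m + 1) 0)

-- partial fill: after j steps
theorem pv_fill_aux (m : Nat) (h : Int → Int) (j : Nat) (hj : j ≤ m) :
    (PySem.List.pyRange 1 ((j : Int) + 1) 1).foldl (fun l i =>
        PySem.List.pySetD l i
          (PySem.Int.mod (PySem.List.pyGetD l (i - 1) 0 + h i) pvM))
      (List.replicate (m + 1) 0)
    = (List.range (j + 1)).map (pvScan h) ++ List.replicate (m - j) 0 := by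
  induction j with
  | zero =>
    simp [PySem.List.pyRange_one_eq_nil (by omega : (1:Int) ≥ 1), pvScan,
      List.replicate_succ]
  | succ j ih =>
    rw [show ((j + 1 : Nat) : Int) + 1 = ((j : Int) + 1) + 1 by push_cast [Nat.cast_add]; ring,
      PySem.List.pyRange_one_succ_right (by omega), List.foldl_append, ih (by omega)]
    simp only [List.foldl_cons, List.foldl_nil]
    have hlen : ((List.range (j + 1)).map (pvScan h)).length = j + 1 := by simp
    -- the read: index ((j:ℤ)+1) - 1 = j, inside the map part
    have hget : PySem.List.pyGetD
        ((List.range (j + 1)).map (pvScan h) ++ List.replicate (m - j) 0) ((j : Int) + 1 - 1) 0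
        = pvScan h j := by
      rw [show ((j : Int) + 1 - 1) = ((j : Nat) : Int) by ring,
        PySem.List.pyGetD_natCast]
      rw [List.getD_append _ _ _ _ (by omega)]
      simp [List.getD]
    rw [hget]
    -- the write: index (j:ℤ)+1 = cast of (j+1)
    rw [show ((j : Int) + 1) = ((j + 1 : Nat) : Int) by push_cast; ring,
      PySem.List.pySetD_natCast]
    have hrep : List.replicate (m - j) (0 : Int) = 0 :: List.replicate (m - (j+1)) 0 := by
      rw [← List.replicate_succ]; congr 1; omega
    rw [hrep, List.set_append_right _ _ (by omega), List.range_succ, List.range_succ]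
    simp [pvScan, List.range_succ]
theorem pv_fill (m : Nat) (h : Int → Int) :
    pvFill m h = (List.range (m + 1)).map (pvScan h) := by
  unfold pvFill
  rw [pv_fill_aux m h m le_rfl]
  simp

def pvB (s i : Nat) : Int := ((Nat.choose (i + s - 1) (2 * s) : Nat) : Int) % pvM

theorem pv_mod_pos : (0:Int) < pvM := by norm_num [pvM]

theorem pv_pref (m s : Nat) (i : Nat) (him : i ≤ m) :
    pvScan (fun i => PySem.List.pyGetD ((List.range (m + 1)).map (pvB s)) i 0) i
    = (((i + s).choose (2 * s + 1) : Nat) : Int) % pvM := by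
  induction i with
  | zero => simp [pvScan, Nat.choose_eq_zero_of_lt (by omega : s < 2 * s + 1)]
  | succ i ih =>
    rw [pvScan, ih (by omega)]
    rw [show ((i : Int) + 1) = ((i + 1 : Nat) : Int) by push_cast; ring,
      PySem.List.pyGetD_natCast,
      List.getD_eq_getElem _ _ (by simp; omega)]
    have hB : (List.map (pvB s) (List.range (m+1)))[i+1]'(by simp; omega) = pvB s (i+1) := by
      simp
    rw [hB, PySem.Int.mod_eq_emod_of_pos pv_mod_pos]
    unfold pvB
    rw [show i + 1 + s - 1 = i + s by omega, ← Int.add_emod]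
    rw [show i + 1 + s = (i + s) + 1 by omega,
      show 2 * s + 1 = (2 * s) + 1 by rfl, Nat.choose_succ_succ]
    simp only [Nat.succ_eq_add_one]
    push_cast
    ring_nf

theorem pv_cur (m s : Nat) (i : Nat) (him : i ≤ m) :
    pvScan (fun i => PySem.List.pyGetD
        ((List.range (m + 1)).map
          (pvScan (fun i => PySem.List.pyGetD ((List.range (m + 1)).map (pvB s)) i 0)))
        (i - 1) 0) i
    = pvB (s + 1) i := by
  have hBform : ∀ i : Nat, pvB (s + 1) i = (((i + s).choose (2 * s + 2) : Nat) : Int) % pvM := by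
    intro i; unfold pvB
    rw [show i + (s + 1) - 1 = i + s by omega, show 2 * (s + 1) = 2 * s + 2 by ring]
  rw [hBform]
  induction i with
  | zero => simp [pvScan, Nat.choose_eq_zero_of_lt (by omega : s < 2 * s + 2)]
  | succ i ih =>
    rw [pvScan, ih (by omega)]
    rw [show ((i : Int) + 1 - 1) = ((i : Nat) : Int) by push_cast; ring,
      PySem.List.pyGetD_natCast,
      List.getD_eq_getElem _ _ (by simp; omega)]
    have hP : (List.map (pvScan (fun i => PySem.List.pyGetD ((List.range (m + 1)).map (pvB s)) i 0)) (List.range (m + 1)))[i]'(by simp; omega)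
        = (((i + s).choose (2 * s + 1) : Nat) : Int) % pvM := by
      simp only [List.getElem_map, List.getElem_range]
      exact pv_pref m s i (by omega)
    rw [hP, PySem.Int.mod_eq_emod_of_pos pv_mod_pos, ← Int.add_emod]
    rw [show i + 1 + s = (i + s) + 1 by omega,
      show 2 * s + 2 = (2 * s + 1) + 1 by rfl, Nat.choose_succ_succ]
    simp only [Nat.succ_eq_add_one]
    push_cast
    ring_nf

theorem pv_step (m s : Nat) :
    pvFill m (fun i => PySem.List.pyGetD
        (pvFill m (fun i => PySem.List.pyGetD ((List.range (m + 1)).map (pvB s)) i 0))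
        (i - 1) 0)
    = (List.range (m + 1)).map (pvB (s + 1)) := by
  simp only [pv_fill]
  refine List.map_congr_left ?_
  intro i hi
  exact pv_cur m s i (by simpa using Nat.lt_succ_iff.mp (List.mem_range.mp hi))

theorem pv_base (m : Nat) : List.replicate (m + 1) (1 : Int) = (List.range (m + 1)).map (pvB 0) := by
  apply List.ext_getElem
  · simp
  · intro i h1 h2
    simp [pvB, pvM]

theorem pv_outer (m t : Nat) :
    (PySem.List.pyRange 1 ((t : Int) + 1) 1).foldl (fun prev _seg =>
      let pref := (PySem.List.pyRange 1 ((m : Int) + 1) 1).foldl (fun pref i =>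
          PySem.List.pySetD pref i
            (PySem.Int.mod (PySem.List.pyGetD pref (i - 1) 0 + PySem.List.pyGetD prev i 0) (10 ^ 9 + 7)))
        (List.replicate (m + 1) 0)
      let cur := (PySem.List.pyRange 1 ((m : Int) + 1) 1).foldl (fun cur i =>
          PySem.List.pySetD cur i
            (PySem.Int.mod (PySem.List.pyGetD cur (i - 1) 0 + PySem.List.pyGetD pref (i - 1) 0) (10 ^ 9 + 7)))
        (List.replicate (m + 1) 0)
      cur) ((List.range (m + 1)).map (pvB 0))
    = (List.range (m + 1)).map (pvB t) := by
  induction t with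
  | zero =>
    rw [show PySem.List.pyRange 1 (((0 : Nat) : Int) + 1) 1 = [] from
      PySem.List.pyRange_one_eq_nil (by norm_num)]
    rfl
  | succ t ih =>
    rw [show PySem.List.pyRange 1 (((t + 1 : Nat) : Int) + 1) 1
          = PySem.List.pyRange 1 ((t : Int) + 1) 1 ++ [(t : Int) + 1] by
        rw [show ((t + 1 : Nat) : Int) + 1 = ((t : Int) + 1) + 1 by push_cast; ring]
        exact PySem.List.pyRange_one_succ_right (by omega),
      List.foldl_append, ih]
    simp only [List.foldl_cons, List.foldl_nil]
    exact pv_step m t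

theorem pv_bloop (j : Nat) (a : Int) (ha : 0 ≤ a) :
    (PySem.List.pyRange 1 ((j : Int) + 1) 1).foldl
      (fun c i => PySem.Int.floordiv (c * (a + i)) i) 1
    = ((a.toNat + j).choose j : Int) := by
  induction j with
  | zero => simp [PySem.List.pyRange_one_eq_nil (by omega : (1:Int) ≥ 1)]
  | succ j ih =>
    rw [show ((j + 1 : Nat) : Int) + 1 = ((j : Int) + 1) + 1 by push_cast [Nat.cast_add]; ring,
      PySem.List.pyRange_one_succ_right (by omega), List.foldl_append, ih]
    simp only [List.foldl_cons, List.foldl_nil]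
    have hcast : a + ((j : Int) + 1) = ((a.toNat + j + 1 : Nat) : Int) := by omega
    have hnat : (a.toNat + j + 1) * (a.toNat + j).choose j
        = (a.toNat + j + 1).choose (j + 1) * (j + 1) := Nat.add_one_mul_choose_eq _ _
    have : ((a.toNat + j).choose j : Int) * (a + ((j : Int) + 1))
        = ((a.toNat + j + 1).choose (j + 1) : Int) * ((j : Int) + 1) := by
      rw [hcast]; exact_mod_cast by rw [mul_comm]; exact_mod_cast hnat
    rw [this, PySem.Int.floordiv_eq_ediv_of_pos (by omega),
      Int.mul_ediv_cancel _ (by omega)]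
    rw [Nat.add_assoc]

theorem pv_main (n k : Int) (hpre : 0 ≤ n ∨ k = 0 ∨ n < k + 1) :
    numberOfSets n k = numberOfSets_alt n k := by
  unfold numberOfSets numberOfSets_alt
  by_cases hk0 : k = 0
  · simp [hk0]
  by_cases hnk : n < k + 1
  · simp [hk0, hnk]
  simp only [if_neg hk0, if_neg hnk]
  by_cases hkneg : k < 0
  · -- k ≤ -1 and n ≥ k+1; Pre gives 0 ≤ n; both loops are empty, both sides are 1
    have hn : 0 ≤ n := by rcases hpre with h | h | h <;> omega
    rw [show PySem.List.pyRange 1 (k + 1) 1 = [] from PySem.List.pyRange_one_eq_nil (by omega),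
      show PySem.List.pyRange 1 (2 * k + 1) 1 = [] from PySem.List.pyRange_one_eq_nil (by omega)]
    simp only [List.foldl_nil]
    rw [PySem.List.pyGetD_eq_getElem _ 0 (by omega) (by simp)]
    simp
  · -- k ≥ 1, n ≥ k + 1
    have hk1 : 1 ≤ k := by omega
    have hn2 : k + 1 ≤ n := by omega
    set m : Nat := n.toNat with hm
    set κ : Nat := k.toNat with hκ
    have hnm : n = (m : Int) := by omega
    have hkκ : k = (κ : Int) := by omega
    have hrepl1 : (n + 1).toNat = m + 1 := by omega
    -- A side
    rw [hrepl1, pv_base m,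
      show k + 1 = ((κ : Nat) : Int) + 1 by omega]
    rw [show PySem.List.pyGetD
        ((PySem.List.pyRange 1 ((κ : Int) + 1) 1).foldl (fun prev _seg =>
          let pref := (PySem.List.pyRange 1 (n + 1) 1).foldl (fun pref i =>
              PySem.List.pySetD pref i
                (PySem.Int.mod (PySem.List.pyGetD pref (i - 1) 0 + PySem.List.pyGetD prev i 0) (10 ^ 9 + 7)))
            (List.replicate (m + 1) 0)
          let cur := (PySem.List.pyRange 1 (n + 1) 1).foldl (fun cur i =>
              PySem.List.pySetD cur i
                (PySem.Int.mod (PySem.List.pyGetD cur (i - 1) 0 + PySem.List.pyGetD pref (i - 1) 0) (10 ^ 9 + 7)))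
            (List.replicate (m + 1) 0)
          cur) ((List.range (m + 1)).map (pvB 0))) n 0
      = pvB κ m by
        rw [show n + 1 = ((m : Nat) : Int) + 1 by omega, pv_outer m κ, hnm,
          PySem.List.pyGetD_natCast, List.getD_eq_getElem _ _ (by simp)]
        simp]
    -- B side
    rw [show 2 * k + 1 = ((2 * κ : Nat) : Int) + 1 by omega,
      pv_bloop (2 * κ) (n - k - 1) (by omega)]
    rw [PySem.Int.mod_eq_emod_of_pos (by norm_num : (0:Int) < 10 ^ 9 + 7)]
    unfold pvB pvM
    rw [show (n - k - 1).toNat + 2 * κ = m + κ - 1 by omega]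

-- ===== VERDICT (by name: the statement is the Claim_ definition above) =====
theorem numberOfSets_spec : Claim_equal_numberOfSets := by
  intro n k _ hpre
  unfold Pre_numberOfSets at hpre
  unfold Spec_numberOfSets
  exact pv_main n k hpre
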